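-- pv_equiv track=rewrite | github.com/MarcYuMusic/myLMSC261 | _Final Project/mcoc_generate.py | calc_closest_val
-- ===== SOURCE A (Python) =====
-- def calc_closest_val(dict, checkMax, data_dir):
--         result = {}
--         if (checkMax):
--             closest = max(dict.values())
--         else:
--             closest = min(dict.values())
--         for key, value in dict.items():
--             if (value == closest):
--                 result[key] = closest
--                 image_name = key.replace(data_dir, "")
--                 just_name = image_name.replace(".jpg", "")
--                 return just_name
--         return result
-- ===== SOURCE B (Python) =====
-- def calc_closest_val(dict, checkMax, data_dir):
--     it = iter(dict.items())
--     best_key, best_val = next(it)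
--     for key, value in it:
--         if (value > best_val) if checkMax else (value < best_val):
--             best_key, best_val = key, value
--     return best_key.replace(data_dir, "").replace(".jpg", "")
-- ===== Notes on version B (the rewrite author's own statement) =====
-- stated objective: simpler
-- what changed: Replaced the two-pass approach (max/min over values, then a second scan for the first matching key) with a single pass that keeps the best (key, value) pair, updating only on strict improvement so the first extremal key wins; the unused result dict is dropped.
import Mathlib
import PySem

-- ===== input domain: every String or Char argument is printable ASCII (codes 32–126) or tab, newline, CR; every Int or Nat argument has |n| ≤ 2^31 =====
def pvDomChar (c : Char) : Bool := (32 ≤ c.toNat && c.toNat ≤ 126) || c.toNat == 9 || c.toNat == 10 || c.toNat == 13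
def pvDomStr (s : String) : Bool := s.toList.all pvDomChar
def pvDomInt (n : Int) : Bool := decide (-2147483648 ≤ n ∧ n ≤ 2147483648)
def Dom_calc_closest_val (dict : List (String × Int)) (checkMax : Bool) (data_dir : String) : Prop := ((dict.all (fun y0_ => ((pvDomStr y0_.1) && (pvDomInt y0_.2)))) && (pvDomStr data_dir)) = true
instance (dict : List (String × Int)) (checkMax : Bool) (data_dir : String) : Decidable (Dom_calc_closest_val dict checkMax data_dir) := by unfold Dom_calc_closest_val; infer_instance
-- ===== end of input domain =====

-- ===== PORT A =====
-- B keeps the best (key,value) pair in one pass instead of A's two passes; return value only.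
-- loop 'for key, value in dict.items(): if value == closest: return fmt(key)' — the trailing
-- 'return result' ({} , not a String) is unreachable once closest ∈ values; "" stands in for it.
def pvFindA (l : List (String × Int)) (closest : Int) (data_dir : String) : String :=
  match l with
  | [] => ""
  | (key, value) :: t =>
      if value = closest then
        PySem.Str.replace (PySem.Str.replace key data_dir "") ".jpg" ""
      else pvFindA t closest data_dir

def calc_closest_val (dict : List (String × Int)) (checkMax : Bool) (data_dir : String) : String :=
  match (if checkMax then PySem.List.max? (dict.map Prod.snd) (fun v => v)
         else PySem.List.min? (dict.map Prod.snd) (fun v => v)) with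
  | none => ""   -- unreachable under Pre_ (dict ≠ []): Python raises ValueError here
  | some closest => pvFindA dict closest data_dir

-- ===== PORT B =====
def pvBest (l : List (String × Int)) (checkMax : Bool) (bk : String) (bv : Int) : String :=
  match l with
  | [] => bk
  | (k, v) :: t =>
      if (if checkMax then bv < v else v < bv) then pvBest t checkMax k v
      else pvBest t checkMax bk bv

def calc_closest_val_alt (dict : List (String × Int)) (checkMax : Bool) (data_dir : String) : String :=
  match dict with
  | [] => ""   -- unreachable under Pre_: next(it) raises StopIteration
  | (k, v) :: t =>
      PySem.Str.replace (PySem.Str.replace (pvBest t checkMax k v) data_dir "") ".jpg" ""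

-- ===== PRECONDITION & SPEC =====
-- Pre_ excludes the empty dict, on which A raises ValueError (max/min of an empty sequence).
def Pre_calc_closest_val (dict : List (String × Int)) (checkMax : Bool) (data_dir : String) : Prop := dict ≠ []
instance (dict : List (String × Int)) (checkMax : Bool) (data_dir : String) : Decidable (Pre_calc_closest_val dict checkMax data_dir) := by unfold Pre_calc_closest_val; infer_instance
def pvWitness_calc_closest_val : (List (String × Int)) × Bool × String := ([("img/a.jpg", 3), ("img/b.jpg", 3)], true, "img/")
def Spec_calc_closest_val (dict : List (String × Int)) (checkMax : Bool) (data_dir : String) (out : String) : Prop := out = calc_closest_val_alt dict checkMax data_dir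
instance (dict : List (String × Int)) (checkMax : Bool) (data_dir : String) (out : String) : Decidable (Spec_calc_closest_val dict checkMax data_dir out) := by unfold Spec_calc_closest_val; infer_instance

-- ===== CLAIM (what is proved, stated in full; the proofs are below) =====
def Claim_equal_calc_closest_val : Prop := ∀ (dict : List (String × Int)) (checkMax : Bool) (data_dir : String), Dom_calc_closest_val dict checkMax data_dir → Pre_calc_closest_val dict checkMax data_dir → Spec_calc_closest_val dict checkMax data_dir (calc_closest_val dict checkMax data_dir)

-- ===== LEMMAS AND PROOFS =====

theorem pvFindA_cons (k : String) (v c : Int) (t : List (String × Int)) (d : String) :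
    pvFindA ((k, v) :: t) c d
      = if v = c then PySem.Str.replace (PySem.Str.replace k d "") ".jpg" "" else pvFindA t c d := rfl

theorem pvBest_cons (k : String) (v : Int) (cm : Bool) (bk : String) (bv : Int) (t : List (String × Int)) :
    pvBest ((k, v) :: t) cm bk bv
      = if (if cm then bv < v else v < bv) then pvBest t cm k v else pvBest t cm bk bv := rfl

-- Main invariant, max case: A's "first key whose value equals the maximum" is B's running best.
theorem pvMainMax : ∀ (t : List (String × Int)) (bk : String) (bv : Int) (d : String),
    pvFindA ((bk, bv) :: t) ((t.map Prod.snd).foldl max bv) d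
      = PySem.Str.replace (PySem.Str.replace (pvBest t true bk bv) d "") ".jpg" "" := by
  intro t
  induction t with
  | nil => intro bk bv d; simp [pvFindA, pvBest]
  | cons p t' ih =>
      intro bk bv d
      obtain ⟨k, v⟩ := p
      rw [List.map_cons, List.foldl_cons, pvBest_cons]
      by_cases h : bv < v
      · have hm : max bv v = v := max_eq_right h.le
        have hle : v ≤ (t'.map Prod.snd).foldl max v := (PySem.List.le_foldl_max _ _).1
        rw [hm, if_pos (by simpa using h), pvFindA_cons, if_neg (by omega)]
        exact ih k v d
      · have hm : max bv v = bv := max_eq_left (by omega)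
        have hle : bv ≤ (t'.map Prod.snd).foldl max bv := (PySem.List.le_foldl_max _ _).1
        rw [hm, if_neg (by simpa using h)]
        have := ih bk bv d
        rw [pvFindA_cons] at this ⊢
        by_cases hb : bv = (t'.map Prod.snd).foldl max bv
        · rw [if_pos hb] at this ⊢; exact this
        · rw [if_neg hb] at this ⊢
          rw [pvFindA_cons, if_neg (by omega : v ≠ (t'.map Prod.snd).foldl max bv)]
          exact this

-- Main invariant, min case (mirror image).
theorem pvMainMin : ∀ (t : List (String × Int)) (bk : String) (bv : Int) (d : String),
    pvFindA ((bk, bv) :: t) ((t.map Prod.snd).foldl min bv) d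
      = PySem.Str.replace (PySem.Str.replace (pvBest t false bk bv) d "") ".jpg" "" := by
  intro t
  induction t with
  | nil => intro bk bv d; simp [pvFindA, pvBest]
  | cons p t' ih =>
      intro bk bv d
      obtain ⟨k, v⟩ := p
      rw [List.map_cons, List.foldl_cons, pvBest_cons]
      by_cases h : v < bv
      · have hm : min bv v = v := min_eq_right h.le
        have hle : (t'.map Prod.snd).foldl min v ≤ v := (PySem.List.foldl_min_le _ _).1
        rw [hm, if_pos (by simpa using h), pvFindA_cons, if_neg (by omega)]
        exact ih k v d
      · have hm : min bv v = bv := min_eq_left (by omega)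
        have hle : (t'.map Prod.snd).foldl min bv ≤ bv := (PySem.List.foldl_min_le _ _).1
        rw [hm, if_neg (by simpa using h)]
        have := ih bk bv d
        rw [pvFindA_cons] at this ⊢
        by_cases hb : bv = (t'.map Prod.snd).foldl min bv
        · rw [if_pos hb] at this ⊢; exact this
        · rw [if_neg hb] at this ⊢
          rw [pvFindA_cons, if_neg (by omega : v ≠ (t'.map Prod.snd).foldl min bv)]
          exact this

-- ===== VERDICT (by name: the statement is the Claim_ definition above) =====
theorem calc_closest_val_spec : Claim_equal_calc_closest_val := by
  intro dict checkMax data_dir _ hpre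
  match dict with
  | [] => exact absurd rfl hpre
  | (k, v) :: t =>
      unfold Spec_calc_closest_val calc_closest_val calc_closest_val_alt
      cases checkMax with
      | true =>
          rw [if_pos rfl, List.map_cons, PySem.List.max?_id_cons]
          exact pvMainMax t k v data_dir
      | false =>
          rw [if_neg (by simp), List.map_cons, PySem.List.min?_id_cons]
          exact pvMainMin t k v data_dir
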